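-- pv_equiv track=rewrite | github.com/LisaVial/MEAsure | utility/channel_utility.py | get_sc_index
-- ===== SOURCE A (Python) =====
-- def get_sc_index(mcs_index: int, dead_channels: list):
--
--     if mcs_index in dead_channels:
--         raise Exception("MCS index is a dead channel and has no SC index")
--
--     sc_index = 0
--     for row_index in range(252):
--
--         if row_index == mcs_index:
--             return sc_index
--
--         if row_index not in dead_channels:
--             sc_index += 1
--
--     raise Exception("MCS index not in valid range (0, 251)")
-- ===== SOURCE B (Python) =====
-- def get_sc_index(mcs_index: int, dead_channels: list):
--
--     if mcs_index in dead_channels: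
--         raise Exception("MCS index is a dead channel and has no SC index")
--
--     if not (0 <= mcs_index < 252):
--         raise Exception("MCS index not in valid range (0, 251)")
--
--     return mcs_index - len({d for d in dead_channels if 0 <= d < mcs_index})
-- ===== Notes on version B (the rewrite author's own statement) =====
-- stated objective: simpler
-- what changed: Replaces the scan over all 252 channel indices with a closed form: after the same two guards (dead check first, then range check), return mcs_index minus the number of distinct dead channels below it.
import Mathlib
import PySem

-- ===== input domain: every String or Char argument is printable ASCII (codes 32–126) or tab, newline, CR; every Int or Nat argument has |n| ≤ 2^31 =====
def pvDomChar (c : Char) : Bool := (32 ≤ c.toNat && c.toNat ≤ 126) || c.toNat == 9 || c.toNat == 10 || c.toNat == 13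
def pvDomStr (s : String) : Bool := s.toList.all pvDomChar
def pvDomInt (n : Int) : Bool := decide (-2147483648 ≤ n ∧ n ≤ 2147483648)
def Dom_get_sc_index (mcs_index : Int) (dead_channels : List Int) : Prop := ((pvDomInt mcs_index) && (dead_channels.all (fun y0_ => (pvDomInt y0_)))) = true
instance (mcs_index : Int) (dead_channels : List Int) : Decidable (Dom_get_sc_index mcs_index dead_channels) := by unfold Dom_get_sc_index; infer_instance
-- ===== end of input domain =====

-- B replaces A's scan over all 252 channel indices by a closed form: mcs_index minus the
-- number of distinct dead channels below it (simpler; same guards, same exceptions).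

-- ===== PORT A =====
-- the for-loop over range(252) with early return; returns 0 only on raise paths (excluded by Pre_)
def pvLoopA (mcs_index : Int) (dead_channels : List Int) : List Int → Int → Int
  | [], _ => 0  -- loop exhausted: Python raises here (outside Pre_)
  | r :: rest, sc =>
      if r = mcs_index then sc
      else pvLoopA mcs_index dead_channels rest (if r ∉ dead_channels then sc + 1 else sc)

def get_sc_index (mcs_index : Int) (dead_channels : List Int) : Int :=
  if mcs_index ∈ dead_channels then 0  -- Python raises (outside Pre_)
  else pvLoopA mcs_index dead_channels (PySem.List.pyRange 0 252 1) 0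

-- ===== PORT B =====
def get_sc_index_alt (mcs_index : Int) (dead_channels : List Int) : Int :=
  if mcs_index ∈ dead_channels then 0  -- Python raises (outside Pre_)
  else if ¬ (0 ≤ mcs_index ∧ mcs_index < 252) then 0  -- Python raises (outside Pre_)
  else mcs_index -
    ((PySem.Set.ofList (dead_channels.filter
        (fun d => decide (0 ≤ d ∧ d < mcs_index)))).length : Int)

-- ===== PRECONDITION & SPEC =====
-- Pre_ excludes exactly the inputs on which A raises: mcs_index dead, or outside range(252).
def Pre_get_sc_index (mcs_index : Int) (dead_channels : List Int) : Prop :=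
  mcs_index ∉ dead_channels ∧ 0 ≤ mcs_index ∧ mcs_index < 252
instance (mcs_index : Int) (dead_channels : List Int) : Decidable (Pre_get_sc_index mcs_index dead_channels) := by unfold Pre_get_sc_index; infer_instance

def pvWitness_get_sc_index : Int × List Int := (5, [2, 3, 2, 260])

def Spec_get_sc_index (mcs_index : Int) (dead_channels : List Int) (out : Int) : Prop := out = get_sc_index_alt mcs_index dead_channels
instance (mcs_index : Int) (dead_channels : List Int) (out : Int) : Decidable (Spec_get_sc_index mcs_index dead_channels out) := by unfold Spec_get_sc_index; infer_instance

-- ===== CLAIM (what is proved, stated in full; the proofs are below) =====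
def Claim_equal_get_sc_index : Prop := ∀ (mcs_index : Int) (dead_channels : List Int), Dom_get_sc_index mcs_index dead_channels → Pre_get_sc_index mcs_index dead_channels → Spec_get_sc_index mcs_index dead_channels (get_sc_index mcs_index dead_channels)

-- ===== LEMMAS AND PROOFS =====

-- loop invariant: starting at k, the loop adds the number of non-dead indices in [k, m)
theorem pvLoopA_eq (m : Int) (dead : List Int) (hm : m < 252) :
    ∀ (n : Nat) (sc : Int), (n : Int) ≤ m →
      pvLoopA m dead (PySem.List.pyRange (m - n) 252 1) sc =
        sc + (((PySem.List.pyRange (m - n) m 1).filter (fun j => !decide (j ∈ dead))).length : Int) := by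
  intro n
  induction n with
  | zero =>
      intro sc _
      rw [show m - (0:Nat) = m by ring]
      rw [PySem.List.pyRange_one_cons (by omega), PySem.List.pyRange_one_eq_nil (le_refl m)]
      simp [pvLoopA]
  | succ n ih =>
      intro sc hn
      have hk : m - ((n:Nat)+1:Nat) < m := by push_cast; omega
      rw [PySem.List.pyRange_one_cons (a := m - ((n:Nat)+1:Nat)) (by omega),
          PySem.List.pyRange_one_cons (a := m - ((n:Nat)+1:Nat)) (b := m) hk]
      set k := m - ((n:Nat)+1:Nat) with hkdef
      have hne : ¬ (k = m) := by omega
      simp only [pvLoopA, if_neg hne]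
      have hstep : k + 1 = m - (n:Nat) := by push_cast [hkdef]; ring
      rw [hstep, ih _ (by omega), List.filter_cons]
      by_cases hmem : k ∈ dead <;> simp [hmem] <;> omega

-- the count of non-dead indices in [0, m) equals m minus the distinct dead channels below m
theorem pv_count (m : Int) (dead : List Int) (h0 : 0 ≤ m) :
    (((PySem.List.pyRange 0 m 1).filter (fun j => !decide (j ∈ dead))).length : Int) =
      m - ((PySem.Set.ofList (dead.filter (fun d => decide (0 ≤ d ∧ d < m)))).length : Int) := by
  have hsplit := List.length_eq_length_filter_add (l := PySem.List.pyRange 0 m 1)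
      (fun j => decide (j ∈ dead))
  have hlen : (PySem.List.pyRange 0 m 1).length = m.toNat := by
    rw [PySem.List.length_pyRange_one]; omega
  -- the two nodup lists have the same members, hence the same length
  have hcard : ((PySem.List.pyRange 0 m 1).filter (fun j => decide (j ∈ dead))).length =
      (PySem.Set.ofList (dead.filter (fun d => decide (0 ≤ d ∧ d < m)))).length := by
    have h1 : ((PySem.List.pyRange 0 m 1).filter (fun j => decide (j ∈ dead))).Nodup :=
      (PySem.List.nodup_pyRange_one 0 m).filter _
    have h2 : (PySem.Set.ofList (dead.filter (fun d => decide (0 ≤ d ∧ d < m)))).Nodup :=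
      PySem.Set.nodup_ofList _
    rw [← List.toFinset_card_of_nodup h1, ← List.toFinset_card_of_nodup h2]
    congr 1
    apply Finset.ext
    intro x
    simp [List.mem_filter, PySem.Set.mem_ofList, PySem.List.mem_pyRange_one]
    tauto
  omega

-- ===== VERDICT (by name: the statement is the Claim_ definition above) =====
theorem get_sc_index_spec : Claim_equal_get_sc_index := by
  intro m dead _ hpre
  obtain ⟨hnd, h0, h252⟩ := hpre
  unfold Spec_get_sc_index get_sc_index get_sc_index_alt
  rw [if_neg hnd, if_neg hnd, if_neg (by simp [h0, h252])]
  have := pvLoopA_eq m dead h252 m.toNat 0 (by omega)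
  rw [show (m - (m.toNat : Int)) = 0 by omega] at this
  rw [this, pv_count m dead h0]
  ring
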